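-- pv_equiv track=rewrite | github.com/robbiehammond/GainsIQ | backend/aux_lambdas/anomaly_detector/anomaly_detector.py | group_sets_into_workouts
-- ===== SOURCE A (Python) =====
-- from typing import List, Dict
--
-- def group_sets_into_workouts(sets_list: List[Dict], gap_hours: int) -> List[List[Dict]]:
--     """Group sorted sets into workouts based on a time gap (8 hours)."""
--     gap_seconds = gap_hours * 3600
--     workouts = []
--     current_group = []
--
--     for s in sets_list:
--         if not current_group:
--             current_group.append(s)
--             continue
--
--         prev_set = current_group[-1]
--         if (s["timestamp"] - prev_set["timestamp"]) > gap_seconds: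
--             workouts.append(current_group)
--             current_group = [s]
--         else:
--             current_group.append(s)
--
--     if current_group:
--         workouts.append(current_group)
--
--     return workouts
-- ===== SOURCE B (Python) =====
-- from typing import List, Dict
--
-- def group_sets_into_workouts(sets_list: List[Dict], gap_hours: int) -> List[List[Dict]]:
--     """Group sorted sets into workouts: find gap boundaries, then slice."""
--     gap_seconds = gap_hours * 3600
--     n = len(sets_list)
--     splits = [i for i in range(1, n)
--               if sets_list[i]["timestamp"] - sets_list[i - 1]["timestamp"] > gap_seconds]
--     bounds = [0] + splits + [n]
--     return [sets_list[a:b] for a, b in zip(bounds, bounds[1:]) if a < b]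
-- ===== Notes on version B (the rewrite author's own statement) =====
-- stated objective: alternative
-- what changed: Replaces the accumulate-and-flush loop (mutable current_group/workouts) by a two-phase computation: collect the gap boundary indices from consecutive pairs, then slice the list between successive bounds.
import Mathlib
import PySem

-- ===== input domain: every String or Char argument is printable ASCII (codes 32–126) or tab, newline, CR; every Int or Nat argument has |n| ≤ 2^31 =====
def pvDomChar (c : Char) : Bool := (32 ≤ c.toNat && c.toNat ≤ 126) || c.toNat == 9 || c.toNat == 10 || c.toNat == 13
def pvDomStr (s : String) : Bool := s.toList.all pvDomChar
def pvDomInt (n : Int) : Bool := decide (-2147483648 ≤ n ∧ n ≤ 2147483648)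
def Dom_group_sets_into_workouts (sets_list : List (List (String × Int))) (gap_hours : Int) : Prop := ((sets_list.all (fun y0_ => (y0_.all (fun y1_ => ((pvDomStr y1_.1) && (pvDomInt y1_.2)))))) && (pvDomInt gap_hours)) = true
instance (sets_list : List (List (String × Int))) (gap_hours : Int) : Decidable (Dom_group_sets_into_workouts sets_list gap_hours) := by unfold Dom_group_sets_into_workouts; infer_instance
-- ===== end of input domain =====

-- B groups the sorted sets by collecting the gap-boundary indices and slicing between successive bounds, instead of A's accumulate-and-flush loop (alternative decomposition, same cost).

-- ===== PORT A =====
-- shared helper: Python's d["timestamp"] on the assoc-list dict (first match; under Pre_ the key is present wherever it is looked up, so the default is never used)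
def pvTs (d : List (String × Int)) : Int := ((d.find? (fun p => p.1 == "timestamp")).map Prod.snd).getD 0

def group_sets_into_workouts (sets_list : List (List (String × Int))) (gap_hours : Int) : List (List (List (String × Int))) :=
  let gap_seconds := gap_hours * 3600
  let st := sets_list.foldl
    (fun (st : List (List (List (String × Int))) × List (List (String × Int))) s =>
      match st.2 with
      | [] => (st.1, st.2 ++ [s])
      | _ :: _ =>
        let prev_set := PySem.List.pyGetD st.2 (-1) []
        if pvTs s - pvTs prev_set > gap_seconds then (st.1 ++ [st.2], [s])
        else (st.1, st.2 ++ [s]))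
    ([], [])
  if st.2 ≠ [] then st.1 ++ [st.2] else st.1
-- ===== PORT B =====
def group_sets_into_workouts_alt (sets_list : List (List (String × Int))) (gap_hours : Int) : List (List (List (String × Int))) :=
  let gap_seconds := gap_hours * 3600
  let n : Int := sets_list.length
  let splits := (PySem.List.pyRange 1 n 1).filter (fun i =>
    decide (pvTs (PySem.List.pyGetD sets_list i []) - pvTs (PySem.List.pyGetD sets_list (i - 1) []) > gap_seconds))
  let bounds := 0 :: (splits ++ [n])
  ((bounds.zip bounds.tail).filter (fun p => decide (p.1 < p.2))).map
    (fun p => PySem.List.slice sets_list (some p.1) (some p.2))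

-- ===== PRECONDITION & SPEC =====
-- Pre_ excludes exactly the inputs where Python A raises KeyError: with two or more sets every set dict must carry the key "timestamp" (with at most one set no lookup happens and A returns).
def Pre_group_sets_into_workouts (sets_list : List (List (String × Int))) (gap_hours : Int) : Prop :=
  sets_list.length ≤ 1 ∨ ∀ d ∈ sets_list, "timestamp" ∈ d.map Prod.fst
instance (sets_list : List (List (String × Int))) (gap_hours : Int) : Decidable (Pre_group_sets_into_workouts sets_list gap_hours) := by unfold Pre_group_sets_into_workouts; infer_instance

def pvWitness_group_sets_into_workouts : (List (List (String × Int))) × Int :=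
  ([[("timestamp", 0)], [("timestamp", 1000)], [("timestamp", 50000)]], 8)

def Spec_group_sets_into_workouts (sets_list : List (List (String × Int))) (gap_hours : Int) (out : List (List (List (String × Int)))) : Prop := out = group_sets_into_workouts_alt sets_list gap_hours
instance (sets_list : List (List (String × Int))) (gap_hours : Int) (out : List (List (List (String × Int)))) : Decidable (Spec_group_sets_into_workouts sets_list gap_hours out) := by unfold Spec_group_sets_into_workouts; infer_instance

-- ===== CLAIM (what is proved, stated in full; the proofs are below) =====
def Claim_equal_group_sets_into_workouts : Prop := ∀ (sets_list : List (List (String × Int))) (gap_hours : Int), Dom_group_sets_into_workouts sets_list gap_hours → Pre_group_sets_into_workouts sets_list gap_hours → Spec_group_sets_into_workouts sets_list gap_hours (group_sets_into_workouts sets_list gap_hours)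

-- ===== LEMMAS AND PROOFS =====
-- both ports are reduced to the common middle form pvH (continuation of the current group, later groups)

def pvPred (g : Int) (l : List (List (String × Int))) (i : Int) : Bool :=
  decide (pvTs (PySem.List.pyGetD l i []) - pvTs (PySem.List.pyGetD l (i - 1) []) > g)

def pvSlices (xs : List (List (String × Int))) (bs : List Int) : List (List (List (String × Int))) :=
  ((bs.zip bs.tail).filter (fun p => decide (p.1 < p.2))).map (fun p => PySem.List.slice xs (some p.1) (some p.2))

theorem pvSlices_cons₂ (xs : List (List (String × Int))) (a b : Int) (t : List Int) :
    pvSlices xs (a :: b :: t)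
      = (if a < b then [PySem.List.slice xs (some a) (some b)] else []) ++ pvSlices xs (b :: t) := by
  simp [pvSlices, List.filter_cons]
  split_ifs <;> simp

theorem pvSlice_succ (x : List (String × Int)) (xs : List (List (String × Int))) (a b : Int)
    (ha : 0 ≤ a) (hb : 0 ≤ b) :
    PySem.List.slice (x :: xs) (some (a + 1)) (some (b + 1)) = PySem.List.slice xs (some a) (some b) := by
  rw [PySem.List.slice_toNat _ (by omega) (by omega), PySem.List.slice_toNat _ ha hb]
  have h1 : (a + 1).toNat = a.toNat + 1 := by omega
  have h2 : (b + 1).toNat = b.toNat + 1 := by omega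
  simp [h1, h2]

theorem pvSlice_zero_succ (x : List (String × Int)) (xs : List (List (String × Int))) (b : Int)
    (hb : 0 ≤ b) :
    PySem.List.slice (x :: xs) (some 0) (some (b + 1)) = x :: PySem.List.slice xs (some 0) (some b) := by
  rw [PySem.List.slice_toNat _ (by omega) (by omega), PySem.List.slice_toNat _ (by omega) hb]
  have h2 : (b + 1).toNat = b.toNat + 1 := by omega
  simp [h2]

theorem pvSlices_shift (x : List (String × Int)) (xs : List (List (String × Int))) (bs : List Int)
    (h : ∀ b ∈ bs, 0 ≤ b) :
    pvSlices (x :: xs) (bs.map (· + 1)) = pvSlices xs bs := by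
  induction bs with
  | nil => rfl
  | cons a t ih =>
    cases t with
    | nil => rfl
    | cons b t' =>
      have ha : 0 ≤ a := h a (by simp)
      have hb : 0 ≤ b := h b (by simp)
      simp only [List.map_cons] at *
      rw [pvSlices_cons₂, pvSlices_cons₂, ih (fun c hc => h c (by simp [hc]))]
      rw [pvSlice_succ x xs a b ha hb]
      by_cases hab : a < b
      · rw [if_pos hab, if_pos (by omega : a + 1 < b + 1)]
      · rw [if_neg hab, if_neg (by omega : ¬ (a + 1 < b + 1))]

theorem pvGetD_cons_succ (x : List (String × Int)) (xs : List (List (String × Int))) (i : Int)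
    (hi : 0 ≤ i) :
    PySem.List.pyGetD (x :: xs) (i + 1) [] = PySem.List.pyGetD xs i [] := by
  rw [PySem.List.pyGetD_of_nonneg _ _ (by omega), PySem.List.pyGetD_of_nonneg _ _ hi]
  have : (i + 1).toNat = i.toNat + 1 := by omega
  simp [this]

theorem pvPred_cons_succ (g : Int) (x : List (String × Int)) (xs : List (List (String × Int)))
    (i : Int) (hi : 1 ≤ i) :
    pvPred g (x :: xs) (i + 1) = pvPred g xs i := by
  unfold pvPred
  rw [show i + 1 - 1 = (i - 1) + 1 by ring,
    pvGetD_cons_succ x xs i (by omega), pvGetD_cons_succ x xs (i - 1) (by omega)]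

theorem pvRange_shift (n : Int) :
    PySem.List.pyRange 2 (n + 1) 1 = (PySem.List.pyRange 1 n 1).map (· + 1) := by
  rw [PySem.List.pyRange_one, PySem.List.pyRange_one]
  rw [show n + 1 - 2 = n - 1 by ring, List.map_map]
  exact List.map_congr_left (fun k _ => by simp; ring)

theorem pvSplits_cons (g : Int) (x y : List (String × Int)) (ys : List (List (String × Int))) :
    (PySem.List.pyRange 1 (((x :: y :: ys).length : Nat) : Int) 1).filter (pvPred g (x :: y :: ys))
      = (if pvPred g (x :: y :: ys) 1 then [(1 : Int)] else [])
        ++ ((PySem.List.pyRange 1 (((y :: ys).length : Nat) : Int) 1).filter (pvPred g (y :: ys))).map (· + 1) := by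
  have hlen : (((x :: y :: ys).length : Nat) : Int) = (((y :: ys).length : Nat) : Int) + 1 := by
    push_cast [List.length_cons]; ring
  rw [hlen, PySem.List.pyRange_one_cons (by push_cast [List.length_cons]; omega),
    show (1 : Int) + 1 = 2 from rfl, pvRange_shift, List.filter_cons]
  rw [List.filter_map]
  have : ((PySem.List.pyRange 1 (((y :: ys).length : Nat) : Int) 1).filter
        ((pvPred g (x :: y :: ys)) ∘ (· + 1)))
      = ((PySem.List.pyRange 1 (((y :: ys).length : Nat) : Int) 1).filter (pvPred g (y :: ys))) := by
    apply List.filter_congr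
    intro i hi
    have h1 : 1 ≤ i := (PySem.List.mem_pyRange_one.mp hi).1
    exact pvPred_cons_succ g x (y :: ys) i h1
  rw [this]
  cases h : pvPred g (x :: y :: ys) 1 <;> simp

theorem pvSlice_zero_zero (xs : List (List (String × Int))) :
    PySem.List.slice xs (some 0) (some 0) = [] := by
  rw [PySem.List.slice_toNat _ (le_refl 0) (le_refl 0)]; simp

theorem pvSlice_nil (a b : Int) : PySem.List.slice ([] : List (List (String × Int))) (some a) (some b) = [] := by
  simp [PySem.List.slice]

def pvH (g : Int) (p : List (String × Int)) :
    List (List (String × Int)) → List (List (String × Int)) × List (List (List (String × Int)))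
  | [] => ([], [])
  | y :: ys =>
    let r := pvH g y ys
    if pvTs y - pvTs p > g then ([], (y :: r.1) :: r.2) else (y :: r.1, r.2)

theorem pvB_eq (xs : List (List (String × Int))) (g : Int) :
    group_sets_into_workouts_alt xs g
      = pvSlices xs (0 :: ((PySem.List.pyRange 1 ((xs.length : Nat) : Int) 1).filter (pvPred (g * 3600) xs)
          ++ [((xs.length : Nat) : Int)])) := rfl

theorem pvPred_one (g : Int) (x y : List (String × Int)) (ys : List (List (String × Int))) :
    pvPred g (x :: y :: ys) 1 = decide (pvTs y - pvTs x > g) := by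
  unfold pvPred
  rw [show (1 : Int) - 1 = 0 from rfl, PySem.List.pyGetD_zero_cons,
    PySem.List.pyGetD_of_nonneg _ _ (by omega : (0:Int) ≤ 1)]
  rfl

theorem pvB_char (g : Int) (x : List (String × Int)) (xs : List (List (String × Int))) :
    group_sets_into_workouts_alt (x :: xs) g
      = (x :: (pvH (g * 3600) x xs).1) :: (pvH (g * 3600) x xs).2 := by
  induction xs generalizing x with
  | nil =>
    rw [pvB_eq]
    rw [show (((([x] : List (List (String × Int))).length : Nat)) : Int) = 1 by simp,
      PySem.List.pyRange_one_eq_nil (le_refl _)]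
    rw [show ((0:Int) :: ([].filter (pvPred (g*3600) [x]) ++ [1])) = [0, 1] by simp]
    rw [pvSlices_cons₂, if_pos (by omega : (0:Int) < 1)]
    rw [show (1:Int) = 0 + 1 from rfl, pvSlice_zero_succ _ _ _ (le_refl 0), pvSlice_nil]
    rfl
  | cons y ys ih =>
    rw [pvB_eq, pvSplits_cons, pvPred_one]
    set S := (PySem.List.pyRange 1 (((y :: ys).length : Nat) : Int) 1).filter (pvPred (g * 3600) (y :: ys)) with hS
    set n : Int := (((y :: ys).length : Nat) : Int) with hn
    set T : List Int := S ++ [n] with hT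
    have hTpos : ∀ b ∈ T, 1 ≤ b := by
      intro b hb
      rcases List.mem_append.mp hb with h | h
      · exact (PySem.List.mem_pyRange_one.mp (List.mem_of_mem_filter h)).1
      · have : b = n := by simpa using h
        subst this
        rw [hn]; push_cast [List.length_cons]; omega
    have hT0 : ∀ b ∈ ((0:Int) :: T), 0 ≤ b := by
      intro b hb
      rcases List.mem_cons.mp hb with h | h
      · omega
      · have := hTpos b h; omega
    have hlen : (((x :: y :: ys).length : Nat) : Int) = n + 1 := by
      rw [hn]; push_cast [List.length_cons]; ring
    have ihy : pvSlices (y :: ys) (0 :: T) = (y :: (pvH (g * 3600) y ys).1) :: (pvH (g * 3600) y ys).2 := by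
      rw [hT, hS, hn, ← pvB_eq]; exact ih y
    by_cases hgap : pvTs y - pvTs x > g * 3600
    · rw [if_pos (decide_eq_true hgap)]
      rw [hlen]
      rw [show ([(1:Int)] ++ S.map (· + 1) ++ [n + 1]) = (1 :: T.map (· + 1)) by
        simp [hT, List.map_append]]
      rw [pvSlices_cons₂, if_pos (by omega : (0:Int) < 1)]
      rw [show ((1:Int) :: T.map (· + 1)) = ((0 :: T).map (· + 1)) by simp]
      rw [pvSlices_shift _ _ _ hT0]
      rw [ihy]
      rw [show (1:Int) = 0 + 1 from rfl, pvSlice_zero_succ _ _ _ (le_refl 0), pvSlice_zero_zero]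
      rw [show pvH (g * 3600) x (y :: ys) = ([], (y :: (pvH (g * 3600) y ys).1) :: (pvH (g * 3600) y ys).2) by
        simp [pvH, if_pos hgap]]
      simp
    · rw [if_neg (by simp [hgap])]
      obtain ⟨h0, t', hT'⟩ : ∃ h0 t', T = h0 :: t' := by
        cases hTe : T with
        | nil => exact absurd hTe (by simp [hT])
        | cons a b => exact ⟨a, b, rfl⟩
      have hh : 1 ≤ h0 := hTpos _ (by rw [hT']; exact List.mem_cons_self)
      have ht'pos : ∀ b ∈ (h0 :: t'), 0 ≤ b := by
        intro b hb
        have := hTpos b (by rw [hT']; exact hb)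
        omega
      rw [hlen]
      rw [show ([] ++ S.map (· + 1) ++ [n + 1]) = T.map (· + 1) by simp [hT, List.map_append]]
      rw [hT', List.map_cons]
      rw [pvSlices_cons₂, if_pos (by omega : (0:Int) < h0 + 1)]
      rw [pvSlice_zero_succ _ _ _ (by omega : (0:Int) ≤ h0)]
      rw [show ((h0 + 1) :: t'.map (· + 1)) = ((h0 :: t').map (· + 1)) by simp]
      rw [pvSlices_shift _ _ _ ht'pos]
      have ihy' := ihy
      rw [hT', pvSlices_cons₂, if_pos (by omega : (0:Int) < h0)] at ihy'
      have hhead : PySem.List.slice (y :: ys) (some 0) (some h0) = y :: (pvH (g * 3600) y ys).1 := by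
        have := congrArg (fun l => l.headD []) ihy'
        simpa using this
      have htail : pvSlices (y :: ys) (h0 :: t') = (pvH (g * 3600) y ys).2 := by
        have := congrArg List.tail ihy'
        simpa using this
      rw [hhead, htail]
      rw [show pvH (g * 3600) x (y :: ys) = (y :: (pvH (g * 3600) y ys).1, (pvH (g * 3600) y ys).2) by
        simp [pvH, if_neg hgap]]
      simp

theorem pvA_loop (g : Int) (l : List (List (String × Int)))
    (ws : List (List (List (String × Int)))) (cg : List (List (String × Int))) (hcg : cg ≠ []) :
    (let st := l.foldl
      (fun (st : List (List (List (String × Int))) × List (List (String × Int))) s =>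
        match st.2 with
        | [] => (st.1, st.2 ++ [s])
        | _ :: _ =>
          let prev_set := PySem.List.pyGetD st.2 (-1) []
          if pvTs s - pvTs prev_set > g then (st.1 ++ [st.2], [s])
          else (st.1, st.2 ++ [s]))
      (ws, cg)
     if st.2 ≠ [] then st.1 ++ [st.2] else st.1)
    = ws ++ ((cg ++ (pvH g (PySem.List.pyGetD cg (-1) []) l).1)
              :: (pvH g (PySem.List.pyGetD cg (-1) []) l).2) := by
  induction l generalizing ws cg with
  | nil =>
    simp [pvH, hcg]
  | cons s l ih =>
    cases cg with
    | nil => exact absurd rfl hcg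
    | cons c cs =>
      by_cases hgap : pvTs s - pvTs (PySem.List.pyGetD (c :: cs) (-1) []) > g
      · simp only [List.foldl_cons, if_pos hgap]
        rw [ih (ws ++ [c :: cs]) [s] (by simp)]
        rw [show PySem.List.pyGetD [s] (-1) [] = s from rfl]
        rw [show pvH g (PySem.List.pyGetD (c :: cs) (-1) []) (s :: l)
            = ([], (s :: (pvH g s l).1) :: (pvH g s l).2) by
          simp [pvH, if_pos hgap]]
        simp
      · simp only [List.foldl_cons, if_neg hgap]
        rw [ih ws ((c :: cs) ++ [s]) (by simp)]
        rw [PySem.List.pyGetD_neg_one_append_singleton]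
        rw [show pvH g (PySem.List.pyGetD (c :: cs) (-1) []) (s :: l)
            = (s :: (pvH g s l).1, (pvH g s l).2) by
          simp [pvH, if_neg hgap]]
        simp

theorem pvA_char (g : Int) (x : List (String × Int)) (xs : List (List (String × Int))) :
    group_sets_into_workouts (x :: xs) g
      = (x :: (pvH (g * 3600) x xs).1) :: (pvH (g * 3600) x xs).2 := by
  show (let st := (x :: xs).foldl _ ([], []); if st.2 ≠ [] then st.1 ++ [st.2] else st.1) = _
  rw [List.foldl_cons]
  have := pvA_loop (g * 3600) xs [] [x] (by simp)
  rw [show PySem.List.pyGetD [x] (-1) [] = x from rfl] at this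
  simpa using this

-- ===== VERDICT (by name: the statement is the Claim_ definition above) =====
theorem group_sets_into_workouts_spec : Claim_equal_group_sets_into_workouts := by
  intro sets_list gap_hours _ _
  unfold Spec_group_sets_into_workouts
  cases sets_list with
  | nil => rfl
  | cons x xs => rw [pvA_char, pvB_char]
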